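-- pv_equiv track=rewrite | github.com/timothyshanks/CodingProjects | Python/EmailCounts.py | organize_inbox
-- ===== SOURCE A (Python) =====
-- def organize_inbox(inbox_string):
--     emails = inbox_string.split(';')
--     senders = {}
--     senders_tuple  = []
--
--     for email in emails:
--         address = email.split(',')[0].strip()
--         if address in senders:
--             senders[address] += 1
--         else:
--             senders[address] = 1
--
--     for address, count in senders.items():
--         senders_tuple.append((address, count))
--
--     senders_tuple = sorted(senders_tuple, key=lambda x:(-x[1], x[0]))
--
--     return(senders_tuple) #pass
-- ===== SOURCE B (Python) =====
-- def organize_inbox(inbox_string):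
--     # sort-then-group instead of hash-map counting
--     addresses = sorted(e.split(',')[0].strip() for e in inbox_string.split(';'))
--     cur, cnt = addresses[0], 1
--     pairs = []
--     for a in addresses[1:]:
--         if a == cur:
--             cnt += 1
--         else:
--             pairs.append((cur, cnt))
--             cur, cnt = a, 1
--     pairs.append((cur, cnt))
--     return sorted(pairs, key=lambda x: (-x[1], x[0]))
-- ===== Notes on version B (the rewrite author's own statement) =====
-- stated objective: alternative
-- what changed: Replaces A's hash-map (dict) counting pass and items() rebuild by sorting the extracted address list and run-length scanning consecutive equal addresses to form the (address, count) pairs, then applying the same final sort by (-count, address).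
import Mathlib
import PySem

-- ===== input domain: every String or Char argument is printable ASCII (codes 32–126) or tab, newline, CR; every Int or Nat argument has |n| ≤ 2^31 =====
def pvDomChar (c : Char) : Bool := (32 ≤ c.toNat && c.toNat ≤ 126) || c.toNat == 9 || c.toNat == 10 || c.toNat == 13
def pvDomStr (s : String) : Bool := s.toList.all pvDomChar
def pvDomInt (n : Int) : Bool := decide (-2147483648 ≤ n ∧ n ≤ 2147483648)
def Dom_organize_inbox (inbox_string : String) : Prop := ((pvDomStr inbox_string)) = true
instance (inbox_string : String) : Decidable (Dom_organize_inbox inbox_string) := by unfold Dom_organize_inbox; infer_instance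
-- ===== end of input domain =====

-- B replaces A's dict-counting pass by sort-then-group (run-length over the sorted address
-- list) followed by the same final sort; alternative decomposition, same asymptotic cost.

-- ===== PORT A =====
-- email.split(',')[0].strip(): split with a nonempty separator always returns a nonempty
-- list, so the [0] indexing is exactly the head (headD's default is never used).
def pvAddrA (email : String) : String :=
  PySem.Str.strip (((PySem.Str.split? email ",").getD []).headD "")

def organize_inbox (inbox_string : String) : List (String × Int) :=
  let emails := (PySem.Str.split? inbox_string ";").getD []
  let senders : PySem.Dict String Int :=
    emails.foldl (fun d email =>
      let address := pvAddrA email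
      if d.contains address then d.insert address (d.getD address 0 + 1)
      else d.insert address 1) PySem.Dict.empty
  let senders_tuple : List (String × Int) :=
    senders.items.foldl (fun acc p => acc ++ [(p.1, p.2)]) []
  PySem.List.sorted2 senders_tuple (fun x => -x.2) (fun x => x.1)

-- ===== PORT B =====
def pvAddrB (email : String) : String :=
  PySem.Str.strip (((PySem.Str.split? email ",").getD []).headD "")

-- the run-length scan over addresses[1:] carrying (cur, cnt)
def pvGroup (cur : String) (cnt : Int) : List String → List (String × Int)
  | [] => [(cur, cnt)]
  | a :: rest => if a == cur then pvGroup cur (cnt + 1) rest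
                 else (cur, cnt) :: pvGroup a 1 rest

def organize_inbox_alt (inbox_string : String) : List (String × Int) :=
  let addresses :=
    PySem.List.sorted (((PySem.Str.split? inbox_string ";").getD []).map pvAddrB)
      (fun x => x) false
  match addresses with
  | [] => []   -- unreachable: str.split always yields at least one piece
  | a :: rest => PySem.List.sorted2 (pvGroup a 1 rest) (fun x => -x.2) (fun x => x.1)

-- ===== PRECONDITION & SPEC =====
def Spec_organize_inbox (inbox_string : String) (out : List (String × Int)) : Prop := out = organize_inbox_alt inbox_string
instance (inbox_string : String) (out : List (String × Int)) : Decidable (Spec_organize_inbox inbox_string out) := by unfold Spec_organize_inbox; infer_instance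

-- ===== CLAIM (what is proved, stated in full; the proofs are below) =====
def Claim_equal_organize_inbox : Prop := ∀ (inbox_string : String), Dom_organize_inbox inbox_string → Spec_organize_inbox inbox_string (organize_inbox inbox_string)

-- ===== LEMMAS AND PROOFS =====

-- sorted2 with keys (-count, address) is sorted with the lexicographic product key
theorem pv_sorted2_eq_sorted_lex (xs : List (String × Int)) :
    PySem.List.sorted2 xs (fun x => -x.2) (fun x => x.1) false
      = PySem.List.sorted xs (fun x => toLex ((-x.2 : Int), x.1)) false := by
  unfold PySem.List.sorted2 PySem.List.sorted
  simp only [if_neg (by decide : ¬ (false = true))]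
  congr 1
  funext acc x
  congr 1
  funext a b
  rw [Bool.eq_iff_iff]
  simp only [Bool.or_eq_true, Bool.and_eq_true, Bool.not_eq_true', decide_eq_true_eq,
    decide_eq_false_iff_not, Prod.Lex.toLex_lt_toLex]
  by_cases hlt : (-a.2 : Int) < -b.2
  · simp [hlt]
  · simp only [hlt, false_or]
    constructor
    · rintro ⟨h, h'⟩; exact ⟨by omega, h'⟩
    · rintro ⟨h, h'⟩; exact ⟨by omega, h'⟩

theorem pv_key_inj : Function.Injective (fun x : String × Int => toLex ((-x.2 : Int), x.1)) := by
  intro a b h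
  simp only [toLex_inj, Prod.mk.injEq, neg_inj] at h
  exact Prod.ext h.2 h.1

theorem pv_getD_of_not_contains {d : PySem.Dict String Int} {a : String}
    (h : d.contains a = false) : d.getD a 0 = 0 := by
  unfold PySem.Dict.getD PySem.Dict.get?
  rcases hf : List.find? (fun p => p.1 == a) d.items with _ | p
  · simp [hf]
  · exfalso
    have hm := List.find?_some hf
    have : d.contains a = true := by
      unfold PySem.Dict.contains
      exact List.any_eq_true.2 ⟨p, List.mem_of_find?_eq_some hf, hm⟩
    simp [this] at h

-- A's counting loop is Counter of the extracted addresses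
theorem pv_loopA_eq_counter (emails : List String) :
    emails.foldl (fun d email =>
        let address := pvAddrA email
        if d.contains address then d.insert address (d.getD address 0 + 1)
        else d.insert address 1) PySem.Dict.empty
      = PySem.Dict.counter (emails.map pvAddrA) := by
  rw [← PySem.Dict.foldl_insert_getD_add_one_eq_counter, List.foldl_map]
  congr 1
  funext d email
  by_cases hc : d.contains (pvAddrA email)
  · simp [hc]
  · simp only [Bool.not_eq_true] at hc
    simp [hc, pv_getD_of_not_contains hc]

-- Set.ofList commutes with filter
theorem pv_ofList_filter (p : String → Bool) (l : List String) :
    PySem.Set.ofList (l.filter p) = (PySem.Set.ofList l).filter p := by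
  induction l with
  | nil => rfl
  | cons x t ih =>
    by_cases hp : p x
    · rw [List.filter_cons_of_pos hp, PySem.Set.ofList_cons, PySem.Set.ofList_cons,
        List.filter_cons_of_pos hp]
      unfold PySem.Set.discard
      rw [ih, List.filter_filter, List.filter_filter]
      congr 1
      apply List.filter_congr
      intro y _
      rw [Bool.and_comm]
    · rw [List.filter_cons_of_neg hp, PySem.Set.ofList_cons, List.filter_cons_of_neg hp, ih]
      unfold PySem.Set.discard
      rw [List.filter_filter]
      apply List.filter_congr
      intro y _
      by_cases hyx : (y == x) = true
      · have hyx' : y = x := eq_of_beq hyx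
        have hpy : p y = false := by rw [hyx']; simpa using hp
        simp [hyx, hpy]
      · simp [hyx]

-- the run-length scan over a sorted tail produces exactly (key, count) pairs
theorem pv_pvGroup_eq (rest : List String) : ∀ (a : String) (n : Int),
    (a :: rest).Pairwise (· ≤ ·) →
    pvGroup a n rest =
      (a, n + (List.count a rest : Int)) ::
        (PySem.Set.ofList (rest.filter (fun x => !(x == a)))).map
          (fun k => (k, (List.count k rest : Int))) := by
  induction rest with
  | nil => intro a n _; simp [pvGroup, PySem.Set.ofList]
  | cons b t ih =>
    intro a n hp
    rcases List.pairwise_cons.1 hp with ⟨hale, hbt⟩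
    by_cases hba : (b == a) = true
    · have hb : b = a := eq_of_beq hba
      subst hb
      have hp' : (b :: t).Pairwise (· ≤ ·) := by
        refine List.pairwise_cons.2 ⟨?_, (List.pairwise_cons.1 hbt).2⟩
        intro x hx; exact hale x (List.mem_cons_of_mem _ hx)
      rw [show pvGroup b n (b :: t) = pvGroup b (n + 1) t by simp [pvGroup], ih b (n + 1) hp',
        List.filter_cons_of_neg (by simp), List.cons_eq_cons]
      refine ⟨?_, ?_⟩
      · have hcnt : (List.count b (b :: t) : Int) = 1 + (List.count b t : Int) := by
          rw [List.count_cons_self]; push_cast; ring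
        rw [hcnt]; ring_nf
      · apply List.map_congr_left
        intro k hk
        have hkmem : k ∈ t.filter (fun x => !(x == b)) := (PySem.Set.mem_ofList _ _).1 hk
        have hkb : k ≠ b := by
          have := (List.mem_filter.1 hkmem).2
          intro h; simp [h] at this
        simp [Ne.symm hkb]
    · -- b ≠ a : a is strictly below everything in b :: t, so a ∉ b :: t
      have hba' : b ≠ a := fun h => hba (by simp [h])
      have hanotin : a ∉ b :: t := by
        intro hmem
        rcases List.mem_cons.1 hmem with h | h
        · exact hba' h.symm
        · have h1 : a ≤ b := hale b List.mem_cons_self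
          have h2 : b ≤ a := (List.pairwise_cons.1 hbt).1 a h
          exact hba' (le_antisymm h2 h1)
      rw [show pvGroup a n (b :: t) = (a, n) :: pvGroup b 1 t by simp [pvGroup, hba],
        ih b 1 hbt]
      have hcount0 : List.count a (b :: t) = 0 := List.count_eq_zero_of_not_mem hanotin
      have hfilter : (b :: t).filter (fun x => !(x == a)) = b :: t := by
        apply List.filter_eq_self.2
        intro x hx
        have : x ≠ a := fun h => hanotin (h ▸ hx)
        simp [this]
      rw [hcount0, hfilter, PySem.Set.ofList_cons]
      unfold PySem.Set.discard
      rw [← pv_ofList_filter, List.map_cons, List.cons_eq_cons, List.cons_eq_cons]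
      refine ⟨by simp, ?_, ?_⟩
      · have hcnt : (List.count b (b :: t) : Int) = 1 + (List.count b t : Int) := by
          rw [List.count_cons_self]; push_cast; ring
        rw [hcnt]
      · apply List.map_congr_left
        intro k hk
        have hkmem : k ∈ t.filter (fun x => !(x == b)) := (PySem.Set.mem_ofList _ _).1 hk
        have hkb : k ≠ b := by
          have := (List.mem_filter.1 hkmem).2
          intro h; simp [h] at this
        simp [Ne.symm hkb]

-- main equivalence
theorem pv_main (s : String) : organize_inbox s = organize_inbox_alt s := by
  have hAB : pvAddrB = pvAddrA := rfl
  unfold organize_inbox organize_inbox_alt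
  simp only [hAB]
  set emails := (PySem.Str.split? s ";").getD [] with hemails
  set l := emails.map pvAddrA with hl
  rw [pv_loopA_eq_counter, PySem.List.foldl_append_singleton_eq_map, List.nil_append,
    PySem.Dict.items_counter]
  have hmapid : (PySem.Dict.counter l).items.map (fun p : String × Int => (p.1, p.2))
      = (PySem.Dict.counter l).items := by simp
  rw [PySem.Dict.items_counter] at hmapid
  rw [hmapid]
  rcases hs : PySem.List.sorted l (fun x => x) false with _ | ⟨a, rest⟩
  · -- sorted l = [] so l = [], both sides are []
    have hlnil : l = [] := (PySem.List.sorted_eq_nil_iff _ _ _).1 hs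
    simp [hlnil, PySem.Set.ofList]
    rfl
  · dsimp only
    rw [pv_sorted2_eq_sorted_lex, pv_sorted2_eq_sorted_lex]
    apply PySem.List.sorted_eq_sorted_of_perm _ _ _ pv_key_inj
    -- Perm between A's items and B's grouped pairs
    have hsp : (a :: rest).Pairwise (· ≤ ·) := by
      have := PySem.List.sorted_pairwise l (fun x => x) (κ := String)
      rwa [hs] at this
    have hperm : (PySem.List.sorted l (fun x => x) false).Perm l :=
      PySem.List.sorted_perm l (fun x => x) false
    rw [hs] at hperm
    rw [pv_pvGroup_eq rest a 1 hsp]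
    -- rewrite grouped pairs as a map over ofList (a :: rest) with counts in (a :: rest)
    have hgrp : ((a, (1 : Int) + (List.count a rest : Int)) ::
        (PySem.Set.ofList (rest.filter (fun x => !(x == a)))).map
          (fun k => (k, (List.count k rest : Int))))
        = (PySem.Set.ofList (a :: rest)).map
            (fun k => (k, (List.count k (a :: rest) : Int))) := by
      rw [PySem.Set.ofList_cons]
      unfold PySem.Set.discard
      rw [← pv_ofList_filter, List.map_cons, List.count_cons_self, List.cons_eq_cons]
      refine ⟨by push_cast; ring_nf, ?_⟩
      apply List.map_congr_left
      intro k hk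
      have hkmem : k ∈ rest.filter (fun x => !(x == a)) := (PySem.Set.mem_ofList _ _).1 hk
      have hka : k ≠ a := by
        have := (List.mem_filter.1 hkmem).2
        intro h; simp [h] at this
      simp [Ne.symm hka]
    rw [hgrp]
    -- counts agree between (a :: rest) and l; key sets are permutations
    have hcnt : ∀ k, (List.count k (a :: rest) : Int) = (List.count k l : Int) := by
      intro k; rw [hperm.count_eq]
    have hmapeq : (PySem.Set.ofList (a :: rest)).map
        (fun k => (k, (List.count k (a :: rest) : Int)))
        = (PySem.Set.ofList (a :: rest)).map (fun k => (k, (List.count k l : Int))) := by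
      apply List.map_congr_left; intro k _; rw [hcnt]
    rw [hmapeq]
    apply List.Perm.map
    apply (List.perm_ext_iff_of_nodup (PySem.Set.nodup_ofList _) (PySem.Set.nodup_ofList _)).2
    intro k
    rw [PySem.Set.mem_ofList, PySem.Set.mem_ofList, ← hperm.mem_iff]

-- ===== VERDICT (by name: the statement is the Claim_ definition above) =====
theorem organize_inbox_spec : Claim_equal_organize_inbox := by
  intro s _
  unfold Spec_organize_inbox
  exact pv_main s
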